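-- pv_equiv track=rewrite | github.com/gregjkal/wg21-paperlint | packages/tomd/src/tomd/api.py | _unquote_yaml_scalar
-- ===== SOURCE A (Python) =====
-- def _unquote_yaml_scalar(s: str) -> str:
--     """Strip surrounding double-quotes and resolve YAML backslash escapes."""
--     if len(s) < 2 or s[0] != '"' or s[-1] != '"':
--         return s
--     inner = s[1:-1]
--     out: list[str] = []
--     i = 0
--     while i < len(inner):
--         ch = inner[i]
--         if ch == "\\" and i + 1 < len(inner):
--             nxt = inner[i + 1]
--             if nxt == "n":
--                 out.append("\n")
--             elif nxt in ('"', "\\"):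
--                 out.append(nxt)
--             else:
--                 out.append(nxt)
--             i += 2
--         else:
--             out.append(ch)
--             i += 1
--     return "".join(out)
-- ===== SOURCE B (Python) =====
-- import re
--
-- def _unquote_yaml_scalar(s: str) -> str:
--     """Strip surrounding double-quotes and resolve YAML backslash escapes."""
--     if len(s) < 2 or s[0] != '"' or s[-1] != '"':
--         return s
--     return re.sub(r'\\(.)', lambda m: '\n' if m.group(1) == 'n' else m.group(1),
--                   s[1:-1], flags=re.S)
-- ===== Notes on version B (the rewrite author's own statement) =====
-- stated objective: idiomatic
-- what changed: A's manual index-driven while-loop with two-character consumption and an append list is replaced by a single regex substitution re.sub(r'\\(.)', repl, inner, flags=re.S) whose non-overlapping left-to-right scan resolves the escapes.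
import Mathlib
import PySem

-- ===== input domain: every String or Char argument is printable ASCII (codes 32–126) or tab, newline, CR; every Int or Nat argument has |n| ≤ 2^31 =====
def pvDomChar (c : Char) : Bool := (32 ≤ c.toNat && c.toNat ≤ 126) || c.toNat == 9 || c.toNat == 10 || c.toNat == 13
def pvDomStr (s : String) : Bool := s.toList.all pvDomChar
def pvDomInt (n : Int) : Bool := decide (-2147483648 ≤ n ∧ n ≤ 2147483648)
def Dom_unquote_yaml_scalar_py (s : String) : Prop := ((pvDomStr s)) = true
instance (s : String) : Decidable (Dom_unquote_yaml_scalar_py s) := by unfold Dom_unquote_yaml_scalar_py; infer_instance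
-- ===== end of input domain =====

-- B replaces A's index-driven while-loop over `inner` with a single regex
-- substitution re.sub(r'\\(.)', …) (ported as a two-character pattern-match
-- recursion); objective: more idiomatic, same cost.

-- ===== PORT A =====
-- A's while-loop: index i over inner, appending to `out`, consuming 2 chars on escapes.
def pvALoop (inner : List Char) (out : List Char) (i : Nat) : List Char :=
  if h : i < inner.length then
    let ch := inner[i]
    if h2 : ch = '\\' ∧ i + 1 < inner.length then
      let nxt := inner[i + 1]'h2.2
      let piece :=
        if nxt = 'n' then '\n'
        else if nxt = '"' ∨ nxt = '\\' then nxt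
        else nxt
      pvALoop inner (out ++ [piece]) (i + 2)
    else
      pvALoop inner (out ++ [ch]) (i + 1)
  else out
termination_by inner.length - i

def unquote_yaml_scalar_py (s : String) : String :=
  if PySem.Str.len s < 2 ∨ PySem.Str.pyGet? s 0 ≠ some '"' ∨ PySem.Str.pyGet? s (-1) ≠ some '"' then
    s
  else
    -- inner = s[1:-1]; "".join(out) = String.ofList
    String.ofList (pvALoop (PySem.List.slice s.toList (some 1) (some (-1))) [] 0)

-- ===== PORT B =====
-- re.sub(r'\\(.)', lambda m: '\n' if m.group(1)=='n' else m.group(1), inner, flags=re.S):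
-- exact port of the regex engine's non-overlapping left-to-right scan of this pattern.
def pvBSub : List Char → List Char
  | '\\' :: d :: rest => (if d = 'n' then '\n' else d) :: pvBSub rest
  | c :: rest => c :: pvBSub rest
  | [] => []

def unquote_yaml_scalar_py_alt (s : String) : String :=
  if PySem.Str.len s < 2 ∨ PySem.Str.pyGet? s 0 ≠ some '"' ∨ PySem.Str.pyGet? s (-1) ≠ some '"' then
    s
  else
    String.ofList (pvBSub (PySem.List.slice s.toList (some 1) (some (-1))))

-- ===== PRECONDITION & SPEC =====
def Spec_unquote_yaml_scalar_py (s : String) (out : String) : Prop := out = unquote_yaml_scalar_py_alt s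
instance (s : String) (out : String) : Decidable (Spec_unquote_yaml_scalar_py s out) := by unfold Spec_unquote_yaml_scalar_py; infer_instance

-- ===== CLAIM (what is proved, stated in full; the proofs are below) =====
def Claim_equal_unquote_yaml_scalar_py : Prop := ∀ (s : String), Dom_unquote_yaml_scalar_py s → Spec_unquote_yaml_scalar_py s (unquote_yaml_scalar_py s)

-- ===== LEMMAS AND PROOFS =====

lemma pvALoop_eq_bSub (l : List Char) :
    ∀ (n i : Nat) (out : List Char), l.length - i ≤ n →
      pvALoop l out i = out ++ pvBSub (l.drop i) := by
  intro n
  induction n with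
  | zero =>
    intro i out h
    have hge : l.length ≤ i := by omega
    rw [pvALoop]
    simp [Nat.not_lt.mpr hge, List.drop_eq_nil_of_le hge, pvBSub]
  | succ n ih =>
    intro i out h
    rw [pvALoop]
    by_cases hi : i < l.length
    · simp only [hi, dif_pos]
      have hdrop : l.drop i = l[i] :: l.drop (i + 1) := List.drop_eq_getElem_cons hi
      by_cases h2 : l[i] = '\\' ∧ i + 1 < l.length
      · simp only [h2, and_self, dif_pos]
        have hdrop2 : l.drop (i + 1) = l[i + 1] :: l.drop (i + 2) :=
          List.drop_eq_getElem_cons h2.2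
        have hb : pvBSub (l.drop i) =
            (if l[i + 1] = 'n' then '\n' else l[i + 1]) :: pvBSub (l.drop (i + 2)) := by
          rw [hdrop, hdrop2, h2.1, pvBSub]
        rw [ih (i + 2) _ (by omega), hb]
        have hpiece :
            (if l[i + 1] = 'n' then '\n'
             else if l[i + 1] = '"' ∨ l[i + 1] = '\\' then l[i + 1] else l[i + 1]) =
            (if l[i + 1] = 'n' then '\n' else l[i + 1]) := by
          split_ifs <;> rfl
        rw [hpiece]
        simp
      · simp only [h2, dif_neg, not_false_iff]
        rw [ih (i + 1) _ (by omega)]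
        have hb : pvBSub (l.drop i) = l[i] :: pvBSub (l.drop (i + 1)) := by
          rw [hdrop]
          by_cases hc : l[i] = '\\'
          · -- then i+1 ≥ length, so drop (i+1) = []
            have : ¬ i + 1 < l.length := fun hlt => h2 ⟨hc, hlt⟩
            have hnil : l.drop (i + 1) = [] := List.drop_eq_nil_of_le (by omega)
            simp [hnil, hc, pvBSub]
          · cases hd : l.drop (i + 1) with
            | nil => simp [pvBSub, hc]
            | cons a t => simp [pvBSub, hc]
        rw [hb]
        simp
    · simp only [hi, dif_neg, not_false_iff]
      have hge : l.length ≤ i := by omega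
      simp [List.drop_eq_nil_of_le hge, pvBSub]

-- ===== VERDICT (by name: the statement is the Claim_ definition above) =====
theorem unquote_yaml_scalar_py_spec : Claim_equal_unquote_yaml_scalar_py := by
  intro s _
  unfold Spec_unquote_yaml_scalar_py unquote_yaml_scalar_py unquote_yaml_scalar_py_alt
  have key : ∀ l : List Char, String.ofList (pvALoop l [] 0) = String.ofList (pvBSub l) := by
    intro l
    rw [pvALoop_eq_bSub l l.length 0 [] (by omega)]
    simp
  simp only [key]
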